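-- pv_equiv track=rewrite | github.com/walterbrunetti/playground | codility/queue_of_cars.py | solution
-- ===== SOURCE A (Python) =====
-- def solution(A, X, Y, Z):
--     """
--         returns maximun amount of time for a car.
--         If any car is unable to refuel, the function should return - 1.
--     """
--     i = 0
--     X_time_left = 0
--     Y_time_left = 0
--     Z_time_left = 0
--     wait = 0
--     while i <= len(A) - 1:
--         car_fuel = A[i]
--         if X - car_fuel >= 0 and is_dispenser_free(X_time_left):
--             X -= car_fuel
--             X_time_left = car_fuel
--             i +=1
--         elif Y - car_fuel >= 0 and is_dispenser_free(Y_time_left):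
--             Y -= car_fuel
--             Y_time_left = car_fuel
--             i +=1
--         elif Z - car_fuel >= 0 and is_dispenser_free(Z_time_left):
--             Z -= car_fuel
--             Z_time_left = car_fuel
--             i +=1
--         else:
--             if all((is_dispenser_free(X_time_left), is_dispenser_free(Y_time_left), is_dispenser_free(Z_time_left))):
--                 return -1
--             wait +=1
--             X_time_left -= 1
--             Y_time_left -= 1
--             Z_time_left -= 1
--
--
--
--     return wait
--
-- def is_dispenser_free(dispenser):
--     return dispenser <= 0
-- ===== SOURCE B (Python) =====
-- def solution(A, X, Y, Z):
--     """Same result as A, but instead of waiting tick by tick it jumps straight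
--     to the smallest timer among dispensers with enough fuel."""
--     xt = yt = zt = 0
--     wait = 0
--     for fuel in A:
--         cands = []
--         if X >= fuel:
--             cands.append(xt)
--         if Y >= fuel:
--             cands.append(yt)
--         if Z >= fuel:
--             cands.append(zt)
--         if not cands:
--             return -1
--         t = max(min(cands), 0)
--         wait += t
--         xt -= t
--         yt -= t
--         zt -= t
--         if X >= fuel and xt <= 0:
--             X -= fuel
--             xt = fuel
--         elif Y >= fuel and yt <= 0:
--             Y -= fuel
--             yt = fuel
--         else:
--             Z -= fuel
--             zt = fuel
--     return wait
-- ===== Notes on version B (the rewrite author's own statement) =====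
-- stated objective: faster
-- what changed: B replaces A's one-second-at-a-time waiting loop (decrementing all dispenser timers by 1 per iteration) by a single per-car jump to max(min(timers of dispensers with enough fuel), 0), so each car is handled in O(1) instead of O(max timer) ticks.
import Mathlib
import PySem

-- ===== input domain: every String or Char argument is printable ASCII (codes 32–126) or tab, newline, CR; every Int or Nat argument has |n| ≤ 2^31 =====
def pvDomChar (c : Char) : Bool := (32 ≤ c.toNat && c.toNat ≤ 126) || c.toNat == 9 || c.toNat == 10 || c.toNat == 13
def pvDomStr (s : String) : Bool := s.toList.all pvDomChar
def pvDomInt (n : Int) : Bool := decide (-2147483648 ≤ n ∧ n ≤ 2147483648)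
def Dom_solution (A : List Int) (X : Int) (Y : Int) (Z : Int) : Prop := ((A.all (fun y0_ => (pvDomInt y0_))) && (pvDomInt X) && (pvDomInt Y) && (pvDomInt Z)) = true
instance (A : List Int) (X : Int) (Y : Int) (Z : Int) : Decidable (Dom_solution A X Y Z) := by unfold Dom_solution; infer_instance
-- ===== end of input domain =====

-- B replaces A's one-second-at-a-time waiting loop by a single jump to the smallest
-- timer among the dispensers with enough fuel (objective: faster, asymptotic).

-- ===== PORT A =====
-- literal port of A's while-loop; state = (index i, capacities X Y Z, timers xt yt zt, wait)
def solutionLoop (As : List Int) (i : Nat) (X Y Z xt yt zt wait : Int) : Int :=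
  if h : i < As.length then
    let f := As[i]
    if X - f ≥ 0 ∧ xt ≤ 0 then
      solutionLoop As (i + 1) (X - f) Y Z f yt zt wait
    else if Y - f ≥ 0 ∧ yt ≤ 0 then
      solutionLoop As (i + 1) X (Y - f) Z xt f zt wait
    else if Z - f ≥ 0 ∧ zt ≤ 0 then
      solutionLoop As (i + 1) X Y (Z - f) xt yt f wait
    else if xt ≤ 0 ∧ yt ≤ 0 ∧ zt ≤ 0 then
      -1
    else
      solutionLoop As i X Y Z (xt - 1) (yt - 1) (zt - 1) (wait + 1)
  else
    wait
termination_by (As.length - i, (max xt (max yt zt)).toNat)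
decreasing_by
  · exact Prod.Lex.left _ _ (Nat.sub_succ_lt_self As.length i h)
  · exact Prod.Lex.left _ _ (Nat.sub_succ_lt_self As.length i h)
  · exact Prod.Lex.left _ _ (Nat.sub_succ_lt_self As.length i h)
  · rename_i hfree
    refine Prod.Lex.right _ ?_
    have h2 : max (xt - 1) (max (yt - 1) (zt - 1)) = max xt (max yt zt) - 1 := by
      rw [max_sub_sub_right yt zt 1, max_sub_sub_right xt (max yt zt) 1]
    have hm : 0 < max xt (max yt zt) :=
      lt_of_not_ge fun hle => hfree ⟨le_trans (le_max_left _ _) hle,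
        le_trans (le_trans (le_max_left yt zt) (le_max_right xt _)) hle,
        le_trans (le_trans (le_max_right yt zt) (le_max_right xt _)) hle⟩
    rw [h2]
    exact (Int.toNat_lt_toNat hm).mpr (sub_one_lt _)

def solution (A : List Int) (X : Int) (Y : Int) (Z : Int) : Int :=
  solutionLoop A 0 X Y Z 0 0 0 0

-- ===== PORT B =====
-- literal port of Source B's for-loop; the remaining cars are the list argument
def altLoop (rest : List Int) (X Y Z xt yt zt wait : Int) : Int :=
  match rest with
  | [] => wait
  | f :: rest =>
    let cands : List Int :=
      (if X ≥ f then [xt] else []) ++ (if Y ≥ f then [yt] else []) ++ (if Z ≥ f then [zt] else [])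
    if cands = [] then -1
    else
      -- t = max(min(cands), 0); cands is non-empty here
      let t := max (match cands with | [] => 0 | c :: cs => cs.foldl min c) 0
      let xt' := xt - t
      let yt' := yt - t
      let zt' := zt - t
      let wait' := wait + t
      if X ≥ f ∧ xt' ≤ 0 then altLoop rest (X - f) Y Z f yt' zt' wait'
      else if Y ≥ f ∧ yt' ≤ 0 then altLoop rest X (Y - f) Z xt' f zt' wait'
      else altLoop rest X Y (Z - f) xt' yt' f wait'

def solution_alt (A : List Int) (X : Int) (Y : Int) (Z : Int) : Int :=
  altLoop A X Y Z 0 0 0 0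

-- ===== PRECONDITION & SPEC =====
def Spec_solution (A : List Int) (X : Int) (Y : Int) (Z : Int) (out : Int) : Prop := out = solution_alt A X Y Z
instance (A : List Int) (X : Int) (Y : Int) (Z : Int) (out : Int) : Decidable (Spec_solution A X Y Z out) := by unfold Spec_solution; infer_instance

-- ===== CLAIM (what is proved, stated in full; the proofs are below) =====
def Claim_equal_solution : Prop := ∀ (A : List Int) (X : Int) (Y : Int) (Z : Int), Dom_solution A X Y Z → Spec_solution A X Y Z (solution A X Y Z)

-- ===== LEMMAS AND PROOFS =====

-- waiting one tick does not change B's result (all eligible timers still positive)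
theorem shift_0 (f : Int) (rest : List Int) (X Y Z xt yt zt wait : Int)
    (h1 : ¬(X - f ≥ 0 ∧ xt ≤ 0)) (h2 : ¬(Y - f ≥ 0 ∧ yt ≤ 0)) (h3 : ¬(Z - f ≥ 0 ∧ zt ≤ 0))
    (hX : X ≥ f) (hY : Y ≥ f) (hZ : Z ≥ f) :
    altLoop (f :: rest) X Y Z (xt - 1) (yt - 1) (zt - 1) (wait + 1)
      = altLoop (f :: rest) X Y Z xt yt zt wait := by
  rw [altLoop, altLoop]
  simp only [hX, hY, hZ, reduceIte, List.cons_append, List.nil_append, List.foldl_cons,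
    List.foldl_nil, reduceCtorEq]
  have e1 : xt - 1 - max (min (min (xt-1) (yt-1)) (zt-1)) 0 = xt - max (min (min xt yt) zt) 0 := by omega
  have e2 : yt - 1 - max (min (min (xt-1) (yt-1)) (zt-1)) 0 = yt - max (min (min xt yt) zt) 0 := by omega
  have e3 : zt - 1 - max (min (min (xt-1) (yt-1)) (zt-1)) 0 = zt - max (min (min xt yt) zt) 0 := by omega
  have e4 : wait + 1 + max (min (min (xt-1) (yt-1)) (zt-1)) 0 = wait + max (min (min xt yt) zt) 0 := by omega
  rw [e1, e2, e3, e4]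

theorem shift_1 (f : Int) (rest : List Int) (X Y Z xt yt zt wait : Int)
    (h1 : ¬(X - f ≥ 0 ∧ xt ≤ 0)) (h2 : ¬(Y - f ≥ 0 ∧ yt ≤ 0)) (h3 : ¬(Z - f ≥ 0 ∧ zt ≤ 0))
    (hX : X ≥ f) (hY : Y ≥ f) (hZ : ¬Z ≥ f) :
    altLoop (f :: rest) X Y Z (xt - 1) (yt - 1) (zt - 1) (wait + 1)
      = altLoop (f :: rest) X Y Z xt yt zt wait := by
  rw [altLoop, altLoop]
  simp only [hX, hY, hZ, reduceIte, List.cons_append, List.nil_append, List.foldl_cons,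
    List.foldl_nil, reduceCtorEq]
  have e1 : xt - 1 - max (min (xt-1) (yt-1)) 0 = xt - max (min xt yt) 0 := by omega
  have e2 : yt - 1 - max (min (xt-1) (yt-1)) 0 = yt - max (min xt yt) 0 := by omega
  have e3 : zt - 1 - max (min (xt-1) (yt-1)) 0 = zt - max (min xt yt) 0 := by omega
  have e4 : wait + 1 + max (min (xt-1) (yt-1)) 0 = wait + max (min xt yt) 0 := by omega
  rw [e1, e2, e3, e4]

theorem shift_2 (f : Int) (rest : List Int) (X Y Z xt yt zt wait : Int)
    (h1 : ¬(X - f ≥ 0 ∧ xt ≤ 0)) (h2 : ¬(Y - f ≥ 0 ∧ yt ≤ 0)) (h3 : ¬(Z - f ≥ 0 ∧ zt ≤ 0))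
    (hX : X ≥ f) (hY : ¬Y ≥ f) (hZ : Z ≥ f) :
    altLoop (f :: rest) X Y Z (xt - 1) (yt - 1) (zt - 1) (wait + 1)
      = altLoop (f :: rest) X Y Z xt yt zt wait := by
  rw [altLoop, altLoop]
  simp only [hX, hY, hZ, reduceIte, List.cons_append, List.nil_append, List.foldl_cons,
    List.foldl_nil, reduceCtorEq]
  have e1 : xt - 1 - max (min (xt-1) (zt-1)) 0 = xt - max (min xt zt) 0 := by omega
  have e2 : yt - 1 - max (min (xt-1) (zt-1)) 0 = yt - max (min xt zt) 0 := by omega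
  have e3 : zt - 1 - max (min (xt-1) (zt-1)) 0 = zt - max (min xt zt) 0 := by omega
  have e4 : wait + 1 + max (min (xt-1) (zt-1)) 0 = wait + max (min xt zt) 0 := by omega
  rw [e1, e2, e3, e4]

theorem shift_3 (f : Int) (rest : List Int) (X Y Z xt yt zt wait : Int)
    (h1 : ¬(X - f ≥ 0 ∧ xt ≤ 0)) (h2 : ¬(Y - f ≥ 0 ∧ yt ≤ 0)) (h3 : ¬(Z - f ≥ 0 ∧ zt ≤ 0))
    (hX : X ≥ f) (hY : ¬Y ≥ f) (hZ : ¬Z ≥ f) :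
    altLoop (f :: rest) X Y Z (xt - 1) (yt - 1) (zt - 1) (wait + 1)
      = altLoop (f :: rest) X Y Z xt yt zt wait := by
  rw [altLoop, altLoop]
  simp only [hX, hY, hZ, reduceIte, List.cons_append, List.nil_append, List.foldl_cons,
    List.foldl_nil, reduceCtorEq]
  have e1 : xt - 1 - max ((xt-1)) 0 = xt - max (xt) 0 := by omega
  have e2 : yt - 1 - max ((xt-1)) 0 = yt - max (xt) 0 := by omega
  have e3 : zt - 1 - max ((xt-1)) 0 = zt - max (xt) 0 := by omega
  have e4 : wait + 1 + max ((xt-1)) 0 = wait + max (xt) 0 := by omega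
  rw [e1, e2, e3, e4]

theorem shift_4 (f : Int) (rest : List Int) (X Y Z xt yt zt wait : Int)
    (h1 : ¬(X - f ≥ 0 ∧ xt ≤ 0)) (h2 : ¬(Y - f ≥ 0 ∧ yt ≤ 0)) (h3 : ¬(Z - f ≥ 0 ∧ zt ≤ 0))
    (hX : ¬X ≥ f) (hY : Y ≥ f) (hZ : Z ≥ f) :
    altLoop (f :: rest) X Y Z (xt - 1) (yt - 1) (zt - 1) (wait + 1)
      = altLoop (f :: rest) X Y Z xt yt zt wait := by
  rw [altLoop, altLoop]
  simp only [hX, hY, hZ, reduceIte, List.cons_append, List.nil_append, List.foldl_cons,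
    List.foldl_nil, reduceCtorEq]
  have e1 : xt - 1 - max (min (yt-1) (zt-1)) 0 = xt - max (min yt zt) 0 := by omega
  have e2 : yt - 1 - max (min (yt-1) (zt-1)) 0 = yt - max (min yt zt) 0 := by omega
  have e3 : zt - 1 - max (min (yt-1) (zt-1)) 0 = zt - max (min yt zt) 0 := by omega
  have e4 : wait + 1 + max (min (yt-1) (zt-1)) 0 = wait + max (min yt zt) 0 := by omega
  rw [e1, e2, e3, e4]

theorem shift_5 (f : Int) (rest : List Int) (X Y Z xt yt zt wait : Int)
    (h1 : ¬(X - f ≥ 0 ∧ xt ≤ 0)) (h2 : ¬(Y - f ≥ 0 ∧ yt ≤ 0)) (h3 : ¬(Z - f ≥ 0 ∧ zt ≤ 0))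
    (hX : ¬X ≥ f) (hY : Y ≥ f) (hZ : ¬Z ≥ f) :
    altLoop (f :: rest) X Y Z (xt - 1) (yt - 1) (zt - 1) (wait + 1)
      = altLoop (f :: rest) X Y Z xt yt zt wait := by
  rw [altLoop, altLoop]
  simp only [hX, hY, hZ, reduceIte, List.cons_append, List.nil_append, List.foldl_cons,
    List.foldl_nil, reduceCtorEq]
  have e1 : xt - 1 - max ((yt-1)) 0 = xt - max (yt) 0 := by omega
  have e2 : yt - 1 - max ((yt-1)) 0 = yt - max (yt) 0 := by omega
  have e3 : zt - 1 - max ((yt-1)) 0 = zt - max (yt) 0 := by omega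
  have e4 : wait + 1 + max ((yt-1)) 0 = wait + max (yt) 0 := by omega
  rw [e1, e2, e3, e4]

theorem shift_6 (f : Int) (rest : List Int) (X Y Z xt yt zt wait : Int)
    (h1 : ¬(X - f ≥ 0 ∧ xt ≤ 0)) (h2 : ¬(Y - f ≥ 0 ∧ yt ≤ 0)) (h3 : ¬(Z - f ≥ 0 ∧ zt ≤ 0))
    (hX : ¬X ≥ f) (hY : ¬Y ≥ f) (hZ : Z ≥ f) :
    altLoop (f :: rest) X Y Z (xt - 1) (yt - 1) (zt - 1) (wait + 1)
      = altLoop (f :: rest) X Y Z xt yt zt wait := by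
  rw [altLoop, altLoop]
  simp only [hX, hY, hZ, reduceIte, List.cons_append, List.nil_append, List.foldl_cons,
    List.foldl_nil, reduceCtorEq]
  have e1 : xt - 1 - max ((zt-1)) 0 = xt - max (zt) 0 := by omega
  have e2 : yt - 1 - max ((zt-1)) 0 = yt - max (zt) 0 := by omega
  have e3 : zt - 1 - max ((zt-1)) 0 = zt - max (zt) 0 := by omega
  have e4 : wait + 1 + max ((zt-1)) 0 = wait + max (zt) 0 := by omega
  rw [e1, e2, e3, e4]

theorem altLoop_shift (f : Int) (rest : List Int) (X Y Z xt yt zt wait : Int)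
    (h1 : ¬(X - f ≥ 0 ∧ xt ≤ 0)) (h2 : ¬(Y - f ≥ 0 ∧ yt ≤ 0)) (h3 : ¬(Z - f ≥ 0 ∧ zt ≤ 0)) :
    altLoop (f :: rest) X Y Z (xt - 1) (yt - 1) (zt - 1) (wait + 1)
      = altLoop (f :: rest) X Y Z xt yt zt wait := by
  by_cases hX : X ≥ f
  · by_cases hY : Y ≥ f
    · by_cases hZ : Z ≥ f
      · exact shift_0 f rest X Y Z xt yt zt wait h1 h2 h3 hX hY hZ
      · exact shift_1 f rest X Y Z xt yt zt wait h1 h2 h3 hX hY hZ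
    · by_cases hZ : Z ≥ f
      · exact shift_2 f rest X Y Z xt yt zt wait h1 h2 h3 hX hY hZ
      · exact shift_3 f rest X Y Z xt yt zt wait h1 h2 h3 hX hY hZ
  · by_cases hY : Y ≥ f
    · by_cases hZ : Z ≥ f
      · exact shift_4 f rest X Y Z xt yt zt wait h1 h2 h3 hX hY hZ
      · exact shift_5 f rest X Y Z xt yt zt wait h1 h2 h3 hX hY hZ
    · by_cases hZ : Z ≥ f
      · exact shift_6 f rest X Y Z xt yt zt wait h1 h2 h3 hX hY hZ
      · rw [altLoop, altLoop]
        simp only [hX, hY, hZ, reduceIte, List.nil_append, List.append_nil]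

-- main simulation lemma: one-tick loop A equals jump loop B
theorem loop_eq (As : List Int) (i : Nat) (X Y Z xt yt zt wait : Int) :
    solutionLoop As i X Y Z xt yt zt wait = altLoop (As.drop i) X Y Z xt yt zt wait := by
  fun_induction solutionLoop As i X Y Z xt yt zt wait
  next i X Y Z xt yt zt wait hlt f hc ih =>
    obtain ⟨hc1, hc2⟩ := hc
    have hX : X ≥ f := by omega
    have hdrop : As.drop i = f :: As.drop (i + 1) := List.drop_eq_getElem_cons hlt
    rw [ih, hdrop, altLoop]
    by_cases hY : Y ≥ f <;> by_cases hZ : Z ≥ f <;>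
      simp only [hX, hY, hZ, reduceIte, List.cons_append, List.nil_append, List.foldl_cons,
        List.foldl_nil, reduceCtorEq]
    · have ht : max (min (min xt yt) zt) 0 = 0 := by omega
      rw [ht]; simp only [sub_zero, add_zero, true_and, false_and, reduceIte]
      all_goals split_ifs <;> first | rfl | (exfalso; omega)
    · have ht : max (min xt yt) 0 = 0 := by omega
      rw [ht]; simp only [sub_zero, add_zero, true_and, false_and, reduceIte]
      all_goals split_ifs <;> first | rfl | (exfalso; omega)
    · have ht : max (min xt zt) 0 = 0 := by omega
      rw [ht]; simp only [sub_zero, add_zero, true_and, false_and, reduceIte]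
      all_goals split_ifs <;> first | rfl | (exfalso; omega)
    · have ht : max xt 0 = 0 := by omega
      rw [ht]; simp only [sub_zero, add_zero, true_and, false_and, reduceIte]
      all_goals split_ifs <;> first | rfl | (exfalso; omega)
  next i X Y Z xt yt zt wait hlt f h1 hc ih =>
    obtain ⟨hc1, hc2⟩ := hc
    have hY : Y ≥ f := by omega
    have hdrop : As.drop i = f :: As.drop (i + 1) := List.drop_eq_getElem_cons hlt
    rw [ih, hdrop, altLoop]
    by_cases hX : X ≥ f <;> by_cases hZ : Z ≥ f <;>
      simp only [hX, hY, hZ, reduceIte, List.cons_append, List.nil_append, List.foldl_cons,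
        List.foldl_nil, reduceCtorEq]
    · have ht : max (min (min xt yt) zt) 0 = 0 := by omega
      rw [ht]; simp only [sub_zero, add_zero, true_and, false_and, reduceIte]
      all_goals split_ifs <;> first | rfl | (exfalso; omega)
    · have ht : max (min xt yt) 0 = 0 := by omega
      rw [ht]; simp only [sub_zero, add_zero, true_and, false_and, reduceIte]
      all_goals split_ifs <;> first | rfl | (exfalso; omega)
    · have ht : max (min yt zt) 0 = 0 := by omega
      rw [ht]; simp only [sub_zero, add_zero, true_and, false_and, reduceIte]
      all_goals split_ifs <;> first | rfl | (exfalso; omega)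
    · have ht : max yt 0 = 0 := by omega
      rw [ht]; simp only [sub_zero, add_zero, true_and, false_and, reduceIte]
      all_goals split_ifs <;> first | rfl | (exfalso; omega)
  next i X Y Z xt yt zt wait hlt f h1 h2 hc ih =>
    obtain ⟨hc1, hc2⟩ := hc
    have hZ : Z ≥ f := by omega
    have hdrop : As.drop i = f :: As.drop (i + 1) := List.drop_eq_getElem_cons hlt
    rw [ih, hdrop, altLoop]
    by_cases hX : X ≥ f <;> by_cases hY : Y ≥ f <;>
      simp only [hX, hY, hZ, reduceIte, List.cons_append, List.nil_append, List.foldl_cons,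
        List.foldl_nil, reduceCtorEq]
    · have ht : max (min (min xt yt) zt) 0 = 0 := by omega
      rw [ht]; simp only [sub_zero, add_zero, true_and, false_and, reduceIte]
      all_goals split_ifs <;> first | rfl | (exfalso; omega)
    · have ht : max (min xt zt) 0 = 0 := by omega
      rw [ht]; simp only [sub_zero, add_zero, true_and, false_and, reduceIte]
      all_goals split_ifs <;> first | rfl | (exfalso; omega)
    · have ht : max (min yt zt) 0 = 0 := by omega
      rw [ht]; simp only [sub_zero, add_zero, true_and, false_and, reduceIte]
      all_goals split_ifs <;> first | rfl | (exfalso; omega)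
    · have ht : max zt 0 = 0 := by omega
      rw [ht]; simp only [sub_zero, add_zero, true_and, false_and, reduceIte]
      all_goals split_ifs <;> first | rfl | (exfalso; omega)
  next i X Y Z xt yt zt wait hlt f h1 h2 h3 hc =>
    have hX : ¬ X ≥ f := by omega
    have hY : ¬ Y ≥ f := by omega
    have hZ : ¬ Z ≥ f := by omega
    have hdrop : As.drop i = f :: As.drop (i + 1) := List.drop_eq_getElem_cons hlt
    rw [hdrop, altLoop]
    simp only [hX, hY, hZ, reduceIte, List.nil_append, List.append_nil]
  next i X Y Z xt yt zt wait hlt f h1 h2 h3 hc ih =>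
    have hdrop : As.drop i = f :: As.drop (i + 1) := List.drop_eq_getElem_cons hlt
    rw [ih, hdrop]
    exact altLoop_shift f (As.drop (i + 1)) X Y Z xt yt zt wait h1 h2 h3
  next i X Y Z xt yt zt wait hnlt =>
    rw [List.drop_eq_nil_of_le (by omega), altLoop]

-- ===== VERDICT (by name: the statement is the Claim_ definition above) =====
theorem solution_spec : Claim_equal_solution := by
  intro A X Y Z _
  show solution A X Y Z = solution_alt A X Y Z
  simpa using loop_eq A 0 X Y Z 0 0 0 0
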